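-- pv_equiv track=rewrite | github.com/KennethEnevoldsen/dna2vec | evaluate/helpers.py | is_within_score_bound
-- ===== SOURCE A (Python) =====
-- def is_within_score_bound(
--     read_sw_distances: list, score_bound: int, sw_original: int
-- ):
--     """
--     Check if smith waterman score between fragment and read is within the score bound
--     """
--
--     for dist in read_sw_distances:
--         if sw_original is not None:
--             if dist - sw_original <= score_bound:
--                 return True
--
--     return False
-- ===== SOURCE B (Python) =====
-- def is_within_score_bound(read_sw_distances: list, score_bound: int, sw_original: int):
--     if sw_original is None or not read_sw_distances:
--         return False
--     return min(read_sw_distances) - sw_original <= score_bound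
-- ===== Notes on version B (the rewrite author's own statement) =====
-- stated objective: simpler
-- what changed: Replaces the per-element early-exit scan with a single aggregate: compute min(read_sw_distances) once and compare it to score_bound + sw_original, valid because the qualifying predicate is monotone in the distance.
import Mathlib
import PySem

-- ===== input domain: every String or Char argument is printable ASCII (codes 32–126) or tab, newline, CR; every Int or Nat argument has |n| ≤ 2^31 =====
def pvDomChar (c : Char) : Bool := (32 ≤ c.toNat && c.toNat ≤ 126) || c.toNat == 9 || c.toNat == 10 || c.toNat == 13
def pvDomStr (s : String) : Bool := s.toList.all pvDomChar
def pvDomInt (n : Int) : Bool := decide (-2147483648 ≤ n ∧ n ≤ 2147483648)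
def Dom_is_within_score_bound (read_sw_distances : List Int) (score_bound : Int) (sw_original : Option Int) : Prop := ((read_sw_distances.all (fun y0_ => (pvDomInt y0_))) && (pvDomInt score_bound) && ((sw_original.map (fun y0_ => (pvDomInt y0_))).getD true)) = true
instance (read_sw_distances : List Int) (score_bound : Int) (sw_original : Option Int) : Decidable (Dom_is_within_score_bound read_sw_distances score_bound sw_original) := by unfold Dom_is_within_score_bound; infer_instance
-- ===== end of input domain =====

-- B replaces A's per-element early-exit scan by one min() aggregate and a single comparison (simpler).

-- ===== PORT A =====
-- literal transliteration: loop over the list; inside, guard on sw_original, early return True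
def is_within_score_bound (read_sw_distances : List Int) (score_bound : Int) (sw_original : Option Int) : Bool :=
  match read_sw_distances with
  | [] => false
  | dist :: rest =>
    match sw_original with
    | some o => if dist - o ≤ score_bound then true else is_within_score_bound rest score_bound sw_original
    | none => is_within_score_bound rest score_bound sw_original

-- ===== PORT B =====
-- Source B: guards, then min(read_sw_distances) (Python min = left fold of binary min over the list)
def is_within_score_bound_alt (read_sw_distances : List Int) (score_bound : Int) (sw_original : Option Int) : Bool :=
  match sw_original, read_sw_distances with
  | none, _ => false
  | some _, [] => false
  | some o, d :: ds => decide (ds.foldl min d - o ≤ score_bound)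

-- ===== PRECONDITION & SPEC =====
def Spec_is_within_score_bound (read_sw_distances : List Int) (score_bound : Int) (sw_original : Option Int) (out : Bool) : Prop := out = is_within_score_bound_alt read_sw_distances score_bound sw_original
instance (read_sw_distances : List Int) (score_bound : Int) (sw_original : Option Int) (out : Bool) : Decidable (Spec_is_within_score_bound read_sw_distances score_bound sw_original out) := by unfold Spec_is_within_score_bound; infer_instance

-- ===== CLAIM (what is proved, stated in full; the proofs are below) =====
def Claim_equal_is_within_score_bound : Prop := ∀ (read_sw_distances : List Int) (score_bound : Int) (sw_original : Option Int), Dom_is_within_score_bound read_sw_distances score_bound sw_original → Spec_is_within_score_bound read_sw_distances score_bound sw_original (is_within_score_bound read_sw_distances score_bound sw_original)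

-- ===== LEMMAS AND PROOFS =====

theorem foldl_min_min (l : List Int) : ∀ (a b : Int), l.foldl min (min a b) = min a (l.foldl min b) := by
  induction l with
  | nil => intro a b; rfl
  | cons c cs ih =>
    intro a b
    simp only [List.foldl, min_assoc]
    exact ih a (min b c)

-- A with sw_original = None is False
theorem isb_none (ds : List Int) (b : Int) : is_within_score_bound ds b none = false := by
  induction ds with
  | nil => rfl
  | cons d rest ih => simpa [is_within_score_bound] using ih

-- A on a nonempty list with some o decides whether the fold-min qualifies
theorem isb_eq_min (ds : List Int) (d : Int) (b o : Int) :
    is_within_score_bound (d :: ds) b (some o) = decide (ds.foldl min d - o ≤ b) := by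
  induction ds generalizing d with
  | nil => simp [is_within_score_bound]
  | cons e es ih =>
    rw [show is_within_score_bound (d :: e :: es) b (some o)
          = (if d - o ≤ b then true else is_within_score_bound (e :: es) b (some o)) from rfl]
    rw [show (e :: es).foldl min d = min d (es.foldl min e) by
          simp only [List.foldl]; exact foldl_min_min es d e]
    by_cases h : d - o ≤ b
    · rw [if_pos h]
      have : min d (es.foldl min e) ≤ d := min_le_left _ _
      have : min d (es.foldl min e) - o ≤ b := by omega
      simp [this]
    · rw [if_neg h, ih e, decide_eq_decide]
      constructor
      · intro hx; omega
      · intro hx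
        rcases min_le_iff.mp (by omega : min d (es.foldl min e) ≤ b + o) with h1 | h1 <;> omega

-- ===== VERDICT (by name: the statement is the Claim_ definition above) =====
theorem is_within_score_bound_spec : Claim_equal_is_within_score_bound := by
  intro ds b o _
  unfold Spec_is_within_score_bound
  match o, ds with
  | none, ds => simp [is_within_score_bound_alt, isb_none]
  | some o, [] => rfl
  | some o, d :: rest => simpa [is_within_score_bound_alt] using isb_eq_min rest d b o
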